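-- pv_equiv track=rewrite | github.com/dvoina/AoC | 2021/day15.py | multiplyLine
-- ===== SOURCE A (Python) =====
-- def multiplyLine(d,n):
--     def v(x):
--         r = x+1
--         if r>9:
--             return 1
--         else:
--             return r
--
--     dd = []
--     for i in range(1, n+1):
--         dd.extend([v(x) for x in d])
--     return dd
-- ===== SOURCE B (Python) =====
-- def multiplyLine(d, n):
--     L = len(d)
--     return [d[i % L] + 1 if d[i % L] + 1 <= 9 else 1 for i in range(n * L)]
-- ===== Notes on version B (the rewrite author's own statement) =====
-- stated objective: alternative
-- what changed: B replaces A's nested structure (an outer loop of n passes, each extending the result with a freshly built transformed copy of d) by one flat pass over the index range 0..n*len(d) that picks each source element by modular indexing d[i % L]; there is no per-tile copy or extend step at all.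
import Mathlib
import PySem

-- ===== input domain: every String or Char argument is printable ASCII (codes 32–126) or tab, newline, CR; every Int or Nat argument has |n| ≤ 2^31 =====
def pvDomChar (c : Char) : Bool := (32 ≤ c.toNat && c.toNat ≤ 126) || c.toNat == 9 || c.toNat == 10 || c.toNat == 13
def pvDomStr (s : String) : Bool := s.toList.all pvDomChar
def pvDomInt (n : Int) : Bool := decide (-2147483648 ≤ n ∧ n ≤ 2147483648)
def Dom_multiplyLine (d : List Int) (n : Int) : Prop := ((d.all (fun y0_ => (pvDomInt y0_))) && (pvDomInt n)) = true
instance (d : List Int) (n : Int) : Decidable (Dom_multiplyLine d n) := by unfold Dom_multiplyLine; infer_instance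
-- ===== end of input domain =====

-- B replaces A's outer loop of repeated extends by one flat pass over the index range
-- 0..n*len(d) with modular indexing d[i % L] (objective: alternative, same cost).

-- ===== PORT A =====
-- inner helper v: r = x+1; if r > 9 return 1 else return r
def pvA_v (x : Int) : Int :=
  let r := x + 1
  if r > 9 then 1 else r

def multiplyLine (d : List Int) (n : Int) : List Int :=
  (PySem.List.pyRange 1 (n + 1) 1).foldl (fun dd _ => dd ++ d.map pvA_v) []

-- ===== PORT B =====
-- [d[i % L] + 1 if d[i % L] + 1 <= 9 else 1 for i in range(n * L)]
-- d[i % L] is always in range when reached (0 ≤ i % L < L and the range is empty when L = 0),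
-- so the total pyGetD with default 0 is exact here.
def multiplyLine_alt (d : List Int) (n : Int) : List Int :=
  let L : Int := d.length
  (PySem.List.pyRange 0 (n * L) 1).map
    (fun i =>
      if PySem.List.pyGetD d (PySem.Int.mod i L) 0 + 1 ≤ 9 then
        PySem.List.pyGetD d (PySem.Int.mod i L) 0 + 1
      else 1)

-- ===== PRECONDITION & SPEC =====
def Spec_multiplyLine (d : List Int) (n : Int) (out : List Int) : Prop := out = multiplyLine_alt d n
instance (d : List Int) (n : Int) (out : List Int) : Decidable (Spec_multiplyLine d n out) := by unfold Spec_multiplyLine; infer_instance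

-- ===== CLAIM (what is proved, stated in full; the proofs are below) =====
def Claim_equal_multiplyLine : Prop := ∀ (d : List Int) (n : Int), Dom_multiplyLine d n → Spec_multiplyLine d n (multiplyLine d n)

-- ===== LEMMAS AND PROOFS =====

-- A's loop is k concatenated copies of the transformed row
theorem pv_foldl_extend (b : List Int) (l : List Int) (acc : List Int) :
    l.foldl (fun dd _ => dd ++ b) acc = acc ++ (List.replicate l.length b).flatten := by
  induction l generalizing acc with
  | nil => simp
  | cons x xs ih => simp [List.foldl, ih, List.replicate, List.append_assoc]

-- one period of B's index map is the transformed row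
theorem pv_one_period (d : List Int) (hd : d ≠ []) :
    (PySem.List.pyRange 0 (d.length : Int) 1).map
      (fun i =>
        if PySem.List.pyGetD d (PySem.Int.mod i (d.length : Int)) 0 + 1 ≤ 9 then
          PySem.List.pyGetD d (PySem.Int.mod i (d.length : Int)) 0 + 1
        else 1)
    = d.map pvA_v := by
  have hL : (0 : Int) < (d.length : Int) := by
    have : 0 < d.length := List.length_pos_iff.mpr hd
    exact_mod_cast this
  have h1 : (PySem.List.pyRange 0 (d.length : Int) 1).map
      (fun i =>
        if PySem.List.pyGetD d (PySem.Int.mod i (d.length : Int)) 0 + 1 ≤ 9 then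
          PySem.List.pyGetD d (PySem.Int.mod i (d.length : Int)) 0 + 1
        else 1)
    = (PySem.List.pyRange 0 (d.length : Int) 1).map
      (fun i => pvA_v (PySem.List.pyGetD d i 0)) := by
    apply List.map_congr_left
    intro i hi
    rw [PySem.List.mem_pyRange_one] at hi
    have hmod : PySem.Int.mod i (d.length : Int) = i := by
      rw [PySem.Int.mod_eq_emod_of_pos hL]
      exact Int.emod_eq_of_lt hi.1 hi.2
    rw [hmod]
    unfold pvA_v
    by_cases h : PySem.List.pyGetD d i 0 + 1 ≤ 9 <;> simp [h] <;> omega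
  rw [h1]
  have h2 : (PySem.List.pyRange 0 (d.length : Int) 1).map
      (fun i => pvA_v (PySem.List.pyGetD d i 0))
    = ((PySem.List.pyRange 0 (d.length : Int) 1).map
        (fun i => PySem.List.pyGetD d i 0)).map pvA_v := by
    rw [List.map_map]; rfl
  rw [h2, PySem.List.map_pyGetD_pyRange_zero']

-- B's flat index map over k periods is k concatenated copies of the row
theorem pv_periods (d : List Int) (hd : d ≠ []) (k : Nat) :
    (PySem.List.pyRange 0 ((k : Int) * (d.length : Int)) 1).map
      (fun i =>
        if PySem.List.pyGetD d (PySem.Int.mod i (d.length : Int)) 0 + 1 ≤ 9 then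
          PySem.List.pyGetD d (PySem.Int.mod i (d.length : Int)) 0 + 1
        else 1)
    = (List.replicate k (d.map pvA_v)).flatten := by
  have hL : (0 : Int) < (d.length : Int) := by
    have : 0 < d.length := List.length_pos_iff.mpr hd
    exact_mod_cast this
  induction k with
  | zero => simp [PySem.List.pyRange_one_eq_nil]
  | succ k ih =>
    set L : Int := (d.length : Int) with hLdef
    have hsplit : PySem.List.pyRange 0 (((k : Int) + 1) * L) 1
        = PySem.List.pyRange 0 L 1 ++ PySem.List.pyRange L (((k : Int) + 1) * L) 1 := by
      apply PySem.List.pyRange_one_append 0 L (((k : Int) + 1) * L) (le_of_lt hL)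
      nlinarith
    have hshift : PySem.List.pyRange L (((k : Int) + 1) * L) 1
        = (PySem.List.pyRange 0 ((k : Int) * L) 1).map (fun j => j + L) := by
      rw [PySem.List.pyRange_one, PySem.List.pyRange_one]
      have : (((k : Int) + 1) * L - L).toNat = ((k : Int) * L - 0).toNat := by
        congr 1; ring
      rw [this, List.map_map]
      apply List.map_congr_left
      intro j _; simp; ring
    have hper : ∀ j : Int, PySem.Int.mod (j + L) L = PySem.Int.mod j L := by
      intro j
      rw [PySem.Int.mod_eq_emod_of_pos hL, PySem.Int.mod_eq_emod_of_pos hL,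
        show j + L = j + L * 1 by ring, Int.add_mul_emod_self_left]
    push_cast
    rw [hsplit, List.map_append, hshift, List.map_map]
    have harg : ((fun i =>
        if PySem.List.pyGetD d (PySem.Int.mod i L) 0 + 1 ≤ 9 then
          PySem.List.pyGetD d (PySem.Int.mod i L) 0 + 1
        else 1) ∘ fun j => j + L)
      = (fun i =>
        if PySem.List.pyGetD d (PySem.Int.mod i L) 0 + 1 ≤ 9 then
          PySem.List.pyGetD d (PySem.Int.mod i L) 0 + 1
        else 1) := by
      funext j; simp [Function.comp, hper j]
    rw [harg, pv_one_period d hd, ih]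
    simp [List.replicate_succ]

-- ===== VERDICT (by name: the statement is the Claim_ definition above) =====
theorem multiplyLine_spec : Claim_equal_multiplyLine := by
  intro d n _
  unfold Spec_multiplyLine multiplyLine multiplyLine_alt
  rw [pv_foldl_extend, PySem.List.length_pyRange_one]
  simp only [List.nil_append]
  have hn : (n + 1 - 1).toNat = n.toNat := by omega
  rw [hn]
  by_cases hd : d = []
  · subst hd
    simp [PySem.List.pyRange_one_eq_nil]
  · by_cases hnpos : 0 < n
    · have : n * (d.length : Int) = (n.toNat : Int) * (d.length : Int) := by
        congr 1; omega
      rw [this, pv_periods d hd n.toNat]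
    · have h0 : n.toNat = 0 := by omega
      have hle : n * (d.length : Int) ≤ 0 := by
        have : 0 ≤ (d.length : Int) := by positivity
        nlinarith
      rw [h0]
      simp [PySem.List.pyRange_one_eq_nil hle]
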